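-- pv_equiv track=rewrite | github.com/tsuru7/algorithm-study | AtCoder/ABC/201-300/ABC256/B.py | solve
-- ===== SOURCE A (Python) =====
-- def solve(n,a):
--     b = [0]*4
--     ans=0
--     for i in range(n):
--         b[0] = 1
--         ai = a[i]
--         for j in range(ai):
--             if b[3] == 1:
--                 ans += 1
--             b[3] = b[2]
--             b[2] = b[1]
--             b[1] = b[0]
--             b[0] = 0
--     return ans
-- ===== SOURCE B (Python) =====
-- def solve(n, a):
--     # Track the set of occupied cells (positions 0..3) instead of a boolean array,
--     # and process each turn's a[i] shifts in one arithmetic step per occupied cell.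
--     occ = set()
--     ans = 0
--     for i in range(n):
--         occ.add(0)
--         k = a[i]
--         if k > 0:
--             nxt = set()
--             for p in occ:
--                 if p + k >= 4:
--                     ans += 1
--                 else:
--                     nxt.add(p + k)
--             occ = nxt
--     return ans
-- ===== Notes on version B (the rewrite author's own statement) =====
-- stated objective: faster
-- what changed: B keeps a set of occupied cell positions and handles each turn's a[i] shifts as one arithmetic step per occupied cell (at most 4), instead of A's a[i] individual shifts of a 4-slot boolean array.
import Mathlib
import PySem

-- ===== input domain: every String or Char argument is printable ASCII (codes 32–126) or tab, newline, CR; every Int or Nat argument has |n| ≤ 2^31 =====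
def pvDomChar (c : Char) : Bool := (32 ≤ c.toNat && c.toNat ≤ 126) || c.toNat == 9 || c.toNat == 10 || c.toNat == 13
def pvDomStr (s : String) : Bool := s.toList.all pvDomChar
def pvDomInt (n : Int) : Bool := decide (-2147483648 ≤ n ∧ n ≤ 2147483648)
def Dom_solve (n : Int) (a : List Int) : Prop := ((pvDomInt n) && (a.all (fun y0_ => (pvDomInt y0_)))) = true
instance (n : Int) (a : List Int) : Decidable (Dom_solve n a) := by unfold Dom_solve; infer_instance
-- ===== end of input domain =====

-- B replaces A's per-unit shifting of a 4-slot boolean array by one arithmetic step per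
-- occupied cell over a set of occupied positions (objective: alternative decomposition).

-- ===== PORT A =====
-- one iteration of A's inner `for j in range(ai)` body
def shiftOnce (st : Int × Int × Int × Int × Int) : Int × Int × Int × Int × Int :=
  match st with
  | (c0, c1, c2, c3, ans) => ((0 : Int), c0, c1, c2, if c3 == 1 then ans + 1 else ans)

-- one iteration of A's outer loop body (b kept as four variables b0..b3)
def turnA (a : List Int) (st : Int × Int × Int × Int × Int) (i : Int) :
    Int × Int × Int × Int × Int :=
  match st with
  | (_, b1, b2, b3, ans) =>
    let ai := (PySem.List.pyGet? a i).getD 0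
    (PySem.List.pyRange 0 ai 1).foldl (fun st2 _ => shiftOnce st2) ((1 : Int), b1, b2, b3, ans)

def solve (n : Int) (a : List Int) : Int :=
  ((PySem.List.pyRange 0 n 1).foldl (turnA a) ((0 : Int), (0 : Int), (0 : Int), (0 : Int), (0 : Int))).2.2.2.2

-- ===== PORT B =====
-- body of B's `for p in occ` loop
def moveOne (k : Int) (st : PySem.Set Int × Int) (p : Int) : PySem.Set Int × Int :=
  if 4 ≤ p + k then (st.1, st.2 + 1) else (PySem.Set.add st.1 (p + k), st.2)

-- one iteration of B's outer loop body
def turnB (a : List Int) (st : PySem.Set Int × Int) (i : Int) : PySem.Set Int × Int :=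
  let occ := PySem.Set.add st.1 0
  let k := (PySem.List.pyGet? a i).getD 0
  if 0 < k then occ.foldl (moveOne k) (PySem.Set.empty, st.2) else (occ, st.2)

def solve_alt (n : Int) (a : List Int) : Int :=
  ((PySem.List.pyRange 0 n 1).foldl (turnB a) ((PySem.Set.empty : PySem.Set Int), (0 : Int))).2

-- ===== PRECONDITION & SPEC =====
-- Pre_ excludes n > len(a), on which A raises IndexError at a[i].
def Pre_solve (n : Int) (a : List Int) : Prop := n ≤ (a.length : Int)
instance (n : Int) (a : List Int) : Decidable (Pre_solve n a) := by unfold Pre_solve; infer_instance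
def pvWitness_solve : Int × List Int := (3, [2, 0, 5])

def Spec_solve (n : Int) (a : List Int) (out : Int) : Prop := out = solve_alt n a
instance (n : Int) (a : List Int) (out : Int) : Decidable (Spec_solve n a out) := by unfold Spec_solve; infer_instance

-- ===== CLAIM (what is proved, stated in full; the proofs are below) =====
def Claim_equal_solve : Prop := ∀ (n : Int) (a : List Int), Dom_solve n a → Pre_solve n a → Spec_solve n a (solve n a)

-- ===== LEMMAS AND PROOFS =====

-- characteristic function of a set of occupied positions
def chi (occ : List Int) (j : Int) : Int := if j ∈ occ then 1 else 0

-- A's 5-tuple state encoded from B's (occupied set, answer) state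
def enc (occ : List Int) (ans : Int) : Int × Int × Int × Int × Int :=
  (chi occ 0, chi occ 1, chi occ 2, chi occ 3, ans)

def GoodState (occ : List Int) : Prop := occ.Nodup ∧ ∀ p ∈ occ, 0 ≤ p ∧ p ≤ 3

-- shift by m positions at once
def shifted (occ : List Int) (m : Nat) : List Int :=
  (occ.filter (fun p => decide (p + (m : Int) < 4))).map (fun p => p + (m : Int))

lemma foldl_ignore (l : List Int) (st : Int × Int × Int × Int × Int) :
    l.foldl (fun st2 _ => shiftOnce st2) st = shiftOnce^[l.length] st := by
  induction l generalizing st with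
  | nil => rfl
  | cons x l ih => simp [List.foldl_cons, ih, Function.iterate_succ_apply]

-- with all elements ≤ 3 and no duplicates, the number of p ∈ occ with 4 ≤ p + 1 is χ_occ(3)
lemma filterlen (occ : List Int) (hnd : occ.Nodup) (hb : ∀ p ∈ occ, p ≤ 3) :
    ((occ.filter (fun p => decide (4 ≤ p + (1 : Int)))).length : Int) = chi occ 3 := by
  induction occ with
  | nil => simp [chi]
  | cons p l ih =>
    obtain ⟨hp, hnd'⟩ := List.nodup_cons.mp hnd
    by_cases h3 : p = 3
    · subst h3
      have hnil : l.filter (fun p => decide (4 ≤ p + (1 : Int))) = [] :=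
        List.filter_eq_nil_iff.mpr (fun q hq => by
          have hq3 : q ≤ 3 := hb q (List.mem_cons_of_mem _ hq)
          have : q ≠ 3 := fun h => hp (h ▸ hq)
          simp; omega)
      simp [hnil, chi]
    · have h4 : ¬ (4 ≤ p + (1 : Int)) := by
        have := hb p (List.mem_cons_self ..); omega
      rw [List.filter_cons_of_neg (by simpa using h4)]
      rw [ih hnd' (fun q hq => hb q (List.mem_cons_of_mem _ hq))]
      simp only [chi, List.mem_cons]
      have : ¬ (3 : Int) = p := fun h => h3 h.symm
      simp [this]

-- counting those pushed out in one shift plus those pushed out in the remaining m shifts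
lemma count_split (m : Nat) (occ : List Int) (hb : ∀ p ∈ occ, p ≤ 3) :
    ((occ.filter (fun p => decide (4 ≤ p + ((m : Int) + 1)))).length : Int)
      = ((occ.filter (fun p => decide (4 ≤ p + (1 : Int)))).length : Int)
        + ((occ.filter (fun p => decide (p + (1 : Int) < 4) && decide (4 ≤ p + (1 : Int) + (m : Int)))).length : Int) := by
  induction occ with
  | nil => simp
  | cons p l ih =>
    have hp := hb p (List.mem_cons_self ..)
    have ihl := ih (fun q hq => hb q (List.mem_cons_of_mem _ hq))
    have hm : (0 : Int) ≤ (m : Int) := Int.natCast_nonneg m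
    simp only [List.filter_cons]
    by_cases h1 : 4 ≤ p + (1 : Int)
    · have ha : (4 : Int) ≤ p + ((m : Int) + 1) := by omega
      have hc : (decide (p + (1 : Int) < 4) && decide (4 ≤ p + (1 : Int) + (m : Int))) = false := by
        simp; omega
      simp [ha, h1, hc, ihl]; ring
    · by_cases h2 : 4 ≤ p + (1 : Int) + (m : Int)
      · have ha : (4 : Int) ≤ p + ((m : Int) + 1) := by omega
        have hc : (decide (p + (1 : Int) < 4) && decide (4 ≤ p + (1 : Int) + (m : Int))) = true := by
          simp; omega
        simp [ha, h1, hc, ihl]; ring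
      · have ha : ¬ (4 : Int) ≤ p + ((m : Int) + 1) := by omega
        have hc : (decide (p + (1 : Int) < 4) && decide (4 ≤ p + (1 : Int) + (m : Int))) = false := by
          simp; omega
        simp [ha, h1, hc, ihl]

-- one application of shiftOnce on an encoded state
lemma shiftOnce_enc (occ : List Int) (ans : Int) (hg : GoodState occ) :
    shiftOnce (enc occ ans)
      = enc (shifted occ 1) (ans + ((occ.filter (fun p => decide (4 ≤ p + (1 : Int)))).length : Int)) := by
  obtain ⟨hnd, hb⟩ := hg
  have hmem : ∀ j : Int, j ∈ shifted occ 1 ↔ (j - 1 ∈ occ ∧ j < 4) := by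
    intro j
    simp only [shifted, Nat.cast_one, List.mem_map, List.mem_filter, decide_eq_true_eq]
    constructor
    · rintro ⟨p, ⟨hpo, hlt⟩, rfl⟩; exact ⟨by simpa using hpo, by omega⟩
    · rintro ⟨hjo, hlt⟩; exact ⟨j - 1, ⟨hjo, by omega⟩, by ring⟩
  have h0 : chi (shifted occ 1) 0 = 0 := by
    simp only [chi, hmem]
    have hno : (-1 : Int) ∉ occ := fun h => by have := (hb _ h).1; omega
    norm_num [hno]
  have hsucc : ∀ j : Int, chi (shifted occ 1) (j + 1) = if j + 1 < 4 then chi occ j else 0 := by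
    intro j
    simp only [chi, hmem, add_sub_cancel_right]
    split_ifs <;> simp_all
  have hans : (if chi occ 3 == 1 then ans + 1 else ans)
      = ans + ((occ.filter (fun p => decide (4 ≤ p + (1 : Int)))).length : Int) := by
    rw [filterlen occ hnd (fun p hp => (hb p hp).2)]
    unfold chi
    split_ifs <;> simp_all
  show ((0 : Int), chi occ 0, chi occ 1, chi occ 2, if chi occ 3 == 1 then ans + 1 else ans) = _
  unfold enc
  rw [h0, hans]
  have e1 := hsucc 0; have e2 := hsucc 1; have e3 := hsucc 2
  norm_num at e1 e2 e3
  rw [e1, e2, e3]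

lemma shifted_shifted (occ : List Int) (m : Nat) :
    shifted (shifted occ 1) m = shifted occ (m + 1) := by
  induction occ with
  | nil => simp [shifted]
  | cons p l ih =>
    unfold shifted at ih ⊢
    push_cast at ih ⊢
    by_cases h1 : p + (1 : Int) < 4
    · by_cases h2 : p + ((m : Int) + 1) < 4
      · have h3 : p + 1 + (m : Int) < 4 := by omega
        simp [h1, h2, h3, ih]
        ring
      · have h3 : ¬ (p + 1 + (m : Int) < 4) := by omega
        simp [h1, h2, h3, ih]
    · have h2 : ¬ (p + ((m : Int) + 1) < 4) := by
        have : (0:Int) ≤ (m:Int) := Int.natCast_nonneg m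
        omega
      simp [h1, h2, ih]

lemma good_shifted (occ : List Int) (m : Nat) (hg : GoodState occ) : GoodState (shifted occ m) := by
  obtain ⟨hnd, hb⟩ := hg
  constructor
  · exact List.Nodup.map (fun a b h => by omega) (hnd.filter _)
  · intro q hq
    simp only [shifted, List.mem_map, List.mem_filter, decide_eq_true_eq] at hq
    obtain ⟨p, ⟨hp, hlt⟩, rfl⟩ := hq
    have := hb p hp
    have := Int.natCast_nonneg m
    exact ⟨by omega, by omega⟩

lemma iterate_shift (m : Nat) (occ : List Int) (ans : Int)
    (hg : GoodState occ) :
    shiftOnce^[m] (enc occ ans)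
      = enc (shifted occ m) (ans + ((occ.filter (fun p => decide (4 ≤ p + (m : Int)))).length : Int)) := by
  induction m generalizing occ ans with
  | zero =>
    have h1 : shifted occ 0 = occ := by
      unfold shifted
      rw [List.filter_eq_self.mpr (fun p hp => by
        simp only [decide_eq_true_eq]
        have := (hg.2 p hp).2
        push_cast
        omega)]
      simp
    have h2 : occ.filter (fun p => decide (4 ≤ p + ((0 : Nat) : Int))) = [] :=
      List.filter_eq_nil_iff.mpr (fun p hp => by
        simp only [decide_eq_true_eq]
        have := (hg.2 p hp).2
        push_cast
        omega)
    simp only [Function.iterate_zero, id, h1, h2]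
    simp
  | succ m ih =>
    rw [Function.iterate_succ_apply, shiftOnce_enc occ ans hg,
        ih (shifted occ 1) _ (good_shifted occ 1 hg), shifted_shifted]
    have hc : (((shifted occ 1).filter (fun p => decide (4 ≤ p + (m : Int)))).length : Int)
        = ((occ.filter (fun p => decide (p + (1 : Int) < 4) && decide (4 ≤ p + (1 : Int) + (m : Int)))).length : Int) := by
      unfold shifted
      rw [List.filter_map, List.length_map, List.filter_filter]
      congr 1
      congr 1
      apply List.filter_congr
      intro p _
      simp only [Function.comp_apply]
      push_cast
      by_cases h1 : p + (1 : Int) < 4 <;> by_cases h2 : 4 ≤ p + (1 : Int) + (m : Int) <;>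
        simp [h1, h2]
    unfold enc
    rw [hc]
    have hcs := count_split m occ (fun p hp => (hg.2 p hp).2)
    push_cast
    push_cast at hcs
    rw [add_assoc, ← hcs]

lemma foldB (k : Int) (l : List Int) (S0 : List Int) (ans : Int)
    (hfresh : ∀ p ∈ l, p + k ∉ S0) (hnd : l.Nodup) :
    l.foldl (moveOne k) (S0, ans)
      = (S0 ++ (l.filter (fun p => decide (p + k < 4))).map (fun p => p + k),
         ans + ((l.filter (fun p => decide (4 ≤ p + k))).length : Int)) := by
  induction l generalizing S0 ans with
  | nil => simp
  | cons p l ih =>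
    obtain ⟨hp, hnd'⟩ := List.nodup_cons.mp hnd
    simp only [List.foldl_cons]
    by_cases h4 : 4 ≤ p + k
    · rw [show moveOne k (S0, ans) p = (S0, ans + 1) by simp [moveOne, h4]]
      rw [ih S0 (ans + 1) (fun q hq => hfresh q (List.mem_cons_of_mem _ hq)) hnd']
      simp [h4]
      ring
    · rw [show moveOne k (S0, ans) p = (S0 ++ [p + k], ans) by
        simp [moveOne, h4, PySem.Set.add_of_not_mem (hfresh p (List.mem_cons_self ..))]]
      rw [ih (S0 ++ [p + k]) ans ?_ hnd']
      · simp [h4, List.append_assoc, show p + k < 4 by omega]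
      · intro q hq hmem
        rcases List.mem_append.mp hmem with h | h
        · exact hfresh q (List.mem_cons_of_mem _ hq) h
        · have hqp : q = p := by have := List.mem_singleton.mp h; omega
          exact hp (hqp ▸ hq)

lemma turn_rel (a : List Int) (i : Int) (occ : List Int) (ans : Int) (hg : GoodState occ) :
    turnA a (enc occ ans) i = enc (turnB a (occ, ans) i).1 (turnB a (occ, ans) i).2
      ∧ GoodState (turnB a (occ, ans) i).1 := by
  obtain ⟨hnd, hb⟩ := hg
  have hg0 : GoodState (PySem.Set.add occ 0) := by
    refine ⟨PySem.Set.nodup_add _ _ hnd, ?_⟩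
    intro p hp
    rcases (PySem.Set.mem_add _ _ _).mp hp with h | h
    · exact hb p h
    · subst h; exact ⟨le_refl 0, by norm_num⟩
  have hstart : turnA a (enc occ ans) i
      = shiftOnce^[((PySem.List.pyGet? a i).getD 0 - 0).toNat] (enc (PySem.Set.add occ 0) ans) := by
    unfold turnA enc
    dsimp only
    rw [foldl_ignore, PySem.List.length_pyRange_one]
    congr 1
    have h0 : chi (PySem.Set.add occ 0) 0 = 1 := by simp [chi, PySem.Set.mem_add]
    have hj : ∀ j : Int, j ≠ 0 → chi (PySem.Set.add occ 0) j = chi occ j := by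
      intro j hjne
      simp [chi, PySem.Set.mem_add, hjne]
    simp [h0, hj 1 (by norm_num), hj 2 (by norm_num), hj 3 (by norm_num)]
  by_cases hk : 0 < (PySem.List.pyGet? a i).getD 0
  · have htn : ((((PySem.List.pyGet? a i).getD 0).toNat : Nat) : Int) = (PySem.List.pyGet? a i).getD 0 :=
      Int.toNat_of_nonneg (le_of_lt hk)
    have hB := foldB ((PySem.List.pyGet? a i).getD 0) (PySem.Set.add occ 0) [] ans (by simp) hg0.1
    constructor
    · rw [hstart, show ((PySem.List.pyGet? a i).getD 0 - 0) = (PySem.List.pyGet? a i).getD 0 by ring,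
          iterate_shift _ _ _ hg0]
      simp only [turnB, if_pos hk, PySem.Set.empty]
      rw [hB]
      simp [shifted, htn]
    · simp only [turnB, if_pos hk, PySem.Set.empty]
      rw [hB]
      have hgs := good_shifted (PySem.Set.add occ 0) ((PySem.List.pyGet? a i).getD 0).toNat hg0
      simpa [shifted, htn] using hgs
  · have hlen : ((PySem.List.pyGet? a i).getD 0 - 0).toNat = 0 := by omega
    constructor
    · rw [hstart, hlen]
      simp only [Function.iterate_zero, id]
      simp [turnB, hk]
    · simp only [turnB, if_neg hk]
      exact hg0

lemma fold_rel (a : List Int) (l : List Int) (occ : List Int) (ans : Int) (hg : GoodState occ) :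
    l.foldl (turnA a) (enc occ ans)
      = enc (l.foldl (turnB a) (occ, ans)).1 (l.foldl (turnB a) (occ, ans)).2 := by
  induction l generalizing occ ans with
  | nil => rfl
  | cons x l ih =>
    have h := turn_rel a x occ ans hg
    simp only [List.foldl_cons, h.1]
    exact ih _ _ h.2

-- ===== VERDICT (by name: the statement is the Claim_ definition above) =====
theorem solve_spec : Claim_equal_solve := by
  intro n a _ _
  unfold Spec_solve solve solve_alt
  have h := fold_rel a (PySem.List.pyRange 0 n 1) [] 0 ⟨List.nodup_nil, by simp⟩
  simp only [enc, chi] at h ⊢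
  rw [show ((0:Int),(0:Int),(0:Int),(0:Int),(0:Int)) = ((if (0:Int) ∈ ([]:List Int) then (1:Int) else 0), (if (1:Int) ∈ ([]:List Int) then (1:Int) else 0), (if (2:Int) ∈ ([]:List Int) then (1:Int) else 0), (if (3:Int) ∈ ([]:List Int) then (1:Int) else 0), (0:Int)) by simp]
  rw [h]
  rfl
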